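-- pv_equiv track=rewrite | github.com/lunaticfoxy/TIL | Algorithm/hackerrank/LarrysArray.py | larrysArray
-- ===== SOURCE A (Python) =====
-- def larrysArray(A):
--     if len(A)<3:
--         return "YES"
--     elif len(A)==3:
--         if A[0]==1:
--             if A[1]==2:
--                 return "YES"
--             else:
--                 return "NO"
--         elif A[0]==2:
--             if A[1]==3:
--                 return "YES"
--             else:
--                 return "NO"
--         else:
--             if A[1]==1:
--                 return "YES"
--             else:
--                 return "NO"
--     else:
--         cur_loc = len(A)-1
--         for i in range(len(A)-1):
--             if A[i]==len(A):
--                 cur_loc = i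
--                 break
--
--         while cur_loc+2 < len(A):
--             temp = A[cur_loc]
--             A[cur_loc] = A[cur_loc+1]
--             A[cur_loc+1] = A[cur_loc+2]
--             A[cur_loc+2] = temp
--             cur_loc = cur_loc + 2
--
--         if cur_loc+1 < len(A):
--             temp = A[cur_loc + 1]
--             A[cur_loc + 1] = A[cur_loc]
--             A[cur_loc] = A[cur_loc - 1]
--             A[cur_loc - 1] = temp
--             cur_loc = cur_loc + 1
--
--         return larrysArray(A[:len(A)-1])
-- ===== SOURCE B (Python) =====
-- def larrysArray(A):
--     # Iterative: each round deletes the element A uses to shrink the list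
--     # (first value equal to len, else last slot) and applies a parity swap,
--     # instead of simulating the 3-element rotations.
--     L = list(A)
--     while len(L) > 3:
--         n = len(L)
--         c = next((i for i in range(n - 1) if L[i] == n), n - 1)
--         del L[c]
--         if (n - c) % 2 == 0:
--             L[-1], L[-2] = L[-2], L[-1]
--     if len(L) < 3:
--         return "YES"
--     if L[0] == 1:
--         return "YES" if L[1] == 2 else "NO"
--     if L[0] == 2:
--         return "YES" if L[1] == 3 else "NO"
--     return "YES" if L[1] == 1 else "NO"
-- ===== Notes on version B (the rewrite author's own statement) =====
-- stated objective: simpler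
-- what changed: B replaces A's recursive simulation of 3-element rotations (rotate the element equal to len to the end, then recurse on a slice) by an iterative loop that directly deletes that element and conditionally swaps the last two remaining elements according to the parity of its distance to the end, then reads off the same 3-element base table.
import Mathlib
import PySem

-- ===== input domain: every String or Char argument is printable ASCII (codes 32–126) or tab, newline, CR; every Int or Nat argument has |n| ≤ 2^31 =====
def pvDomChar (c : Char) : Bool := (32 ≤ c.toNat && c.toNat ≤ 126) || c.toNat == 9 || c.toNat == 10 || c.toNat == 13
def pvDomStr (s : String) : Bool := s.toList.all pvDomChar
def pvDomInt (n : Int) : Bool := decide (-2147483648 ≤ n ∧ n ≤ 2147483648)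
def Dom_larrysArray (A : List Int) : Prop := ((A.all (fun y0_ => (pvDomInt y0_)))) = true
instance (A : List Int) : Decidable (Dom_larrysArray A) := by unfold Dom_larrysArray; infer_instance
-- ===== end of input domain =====

-- B replaces A's simulation of 3-element rotations by a direct delete-plus-parity-swap
-- round, done iteratively (objective: simpler).  NOTE: the Python A mutates its argument
-- in place (rotations on the caller's list); the equivalence proved here is about the
-- return value only — B copies its input and leaves the argument untouched.

-- ===== PORT A =====
-- the 'for i in range(len(A)-1): if A[i]==len(A): cur_loc=i; break' loop (default len(A)-1)
def larryFind (L : List Int) (i : Nat) : Nat :=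
  if i < L.length - 1 then
    if L.getD i 0 == (L.length : Int) then i else larryFind L (i + 1)
  else L.length - 1
termination_by L.length - 1 - i

-- the 'while cur_loc+2 < len(A)' rotation loop; returns the mutated list and cur_loc
def rotLoop (L : List Int) (cur : Nat) : List Int × Nat :=
  if cur + 2 < L.length then
    let t := L.getD cur 0
    let L1 := L.set cur (L.getD (cur + 1) 0)
    let L2 := L1.set (cur + 1) (L1.getD (cur + 2) 0)
    let L3 := L2.set (cur + 2) t
    rotLoop L3 (cur + 2)
  else (L, cur)
termination_by L.length - cur
decreasing_by simp only [List.length_set]; omega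

def larrysArray (A : List Int) : String :=
  if A.length < 3 then "YES"
  else if A.length == 3 then
    if A.getD 0 0 == 1 then (if A.getD 1 0 == 2 then "YES" else "NO")
    else if A.getD 0 0 == 2 then (if A.getD 1 0 == 3 then "YES" else "NO")
    else (if A.getD 1 0 == 1 then "YES" else "NO")
  else
    let c := larryFind A 0
    let p := rotLoop A c
    let L := p.1
    let cur := p.2
    let L2 :=
      if cur + 1 < L.length then
        let t := L.getD (cur + 1) 0
        let La := L.set (cur + 1) (L.getD cur 0)
        let Lb := La.set cur (La.getD (cur - 1) 0)
        Lb.set (cur - 1) t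
      else L
    -- A[:len(A)-1] (len(A) ≥ 4, so the slice is a plain take)
    larrysArray (L2.take (A.length - 1))
termination_by A.length
decreasing_by
  rename_i h1 h2
  have : (A.length - 1) < A.length := by
    simp only [beq_iff_eq] at h2; omega
  calc _ ≤ A.length - 1 := by simp
    _ < A.length := this

-- ===== PORT B =====
-- one round of Source B's while loop: delete the chosen element, parity swap of the last two
def altStep (L : List Int) : List Int :=
  let n := L.length
  let c := ((L.take (n - 1)).findIdx? (fun x => x == (n : Int))).getD (n - 1)
  let L1 := L.eraseIdx c
  if (n - c) % 2 == 0 then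
    let m := L1.length
    (L1.set (m - 2) (L1.getD (m - 1) 0)).set (m - 1) (L1.getD (m - 2) 0)
  else L1

-- length strictly drops each round (cited by altLoop's decreasing_by)
theorem altStep_length_lt (L : List Int) (h : 3 < L.length) :
    (altStep L).length < L.length := by
  unfold altStep
  simp only []
  have hc : ((L.take (L.length - 1)).findIdx? (fun x => x == (L.length : Int))).getD (L.length - 1)
      < L.length := by
    rcases hf : (L.take (L.length - 1)).findIdx? (fun x => x == (L.length : Int)) with _ | j
    · simp; omega
    · have := List.findIdx?_eq_some_iff_findIdx_eq.mp hf |>.1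
      have hlen : (L.take (L.length - 1)).length ≤ L.length - 1 := by
        simp
      simp only [Option.getD_some]
      omega
  set c := ((L.take (L.length - 1)).findIdx? (fun x => x == (L.length : Int))).getD (L.length - 1)
  split <;> simp [List.length_eraseIdx, hc] <;> omega

def altLoop (L : List Int) : List Int :=
  if 3 < L.length then altLoop (altStep L) else L
termination_by L.length
decreasing_by exact altStep_length_lt L (by assumption)

def larrysArray_alt (A : List Int) : String :=
  let L := altLoop A
  if L.length < 3 then "YES"
  else if L.getD 0 0 == 1 then (if L.getD 1 0 == 2 then "YES" else "NO")
  else if L.getD 0 0 == 2 then (if L.getD 1 0 == 3 then "YES" else "NO")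
  else (if L.getD 1 0 == 1 then "YES" else "NO")

-- ===== PRECONDITION & SPEC =====
def Spec_larrysArray (A : List Int) (out : String) : Prop := out = larrysArray_alt A
instance (A : List Int) (out : String) : Decidable (Spec_larrysArray A out) := by unfold Spec_larrysArray; infer_instance

-- ===== CLAIM (what is proved, stated in full; the proofs are below) =====
def Claim_equal_larrysArray : Prop := ∀ (A : List Int), Dom_larrysArray A → Spec_larrysArray A (larrysArray A)

-- ===== LEMMAS AND PROOFS =====

theorem set2_window (L : List Int) (i : Nat) (h : i + 1 < L.length) (a b : Int) :
    (L.set i a).set (i+1) b = L.take i ++ [a, b] ++ L.drop (i+2) := by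
  induction i generalizing L with
  | zero => match L, h with
    | x :: y :: t, _ => simp [List.set]
  | succ n ih => match L, h with
    | x :: l, h =>
      simp only [List.set_cons_succ, List.take_succ_cons, List.drop_succ_cons, List.cons_append]
      rw [ih l (by simpa using h)]

theorem set3_window (L : List Int) (i : Nat) (h : i + 2 < L.length) (a b c : Int) :
    ((L.set i a).set (i+1) b).set (i+2) c = L.take i ++ [a, b, c] ++ L.drop (i+3) := by
  induction i generalizing L with
  | zero => match L, h with
    | x :: y :: z :: t, _ => simp [List.set]
  | succ n ih => match L, h with
    | x :: l, h =>
      simp only [List.set_cons_succ, List.take_succ_cons, List.drop_succ_cons, List.cons_append]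
      rw [ih l (by simpa using h)]

theorem larryFind_eq_aux (L : List Int) (i : Nat) :
    larryFind L i =
      (((L.take (L.length - 1)).drop i).findIdx? (fun x => x == (L.length : Int))).elim
        (L.length - 1) (fun j => i + j) := by
  by_cases h : i < L.length - 1
  · have hi : i < (L.take (L.length - 1)).length := by simp; omega
    rw [List.drop_eq_getElem_cons hi, List.findIdx?_cons]
    have hg : (L.take (L.length - 1))[i] = L[i]'(by omega) := List.getElem_take
    rw [larryFind]
    simp only [if_pos h]
    by_cases hp : L.getD i 0 == (L.length : Int)
    · have : L.getD i 0 = L[i]'(by omega) := List.getD_eq_getElem L 0 (by omega)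
      rw [if_pos hp]
      rw [this] at hp
      simp [hg, hp]
    · have : L.getD i 0 = L[i]'(by omega) := List.getD_eq_getElem L 0 (by omega)
      rw [if_neg hp]
      rw [this] at hp
      simp only [hg, hp]
      rw [larryFind_eq_aux L (i+1)]
      rcases hf : ((L.take (L.length - 1)).drop (i+1)).findIdx? (fun x => x == (L.length : Int)) with _ | j
      · simp
      · simp
        omega
  · rw [larryFind]
    simp only [if_neg h]
    have : (L.take (L.length - 1)).drop i = [] := by
      apply List.drop_eq_nil_of_le; simp; omega
    simp [this]
termination_by L.length - 1 - i

theorem larryFind_eq (L : List Int) :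
    larryFind L 0 = ((L.take (L.length - 1)).findIdx? (fun x => x == (L.length : Int))).getD (L.length - 1) := by
  rw [larryFind_eq_aux L 0, List.drop_zero]
  rcases hf : (L.take (L.length - 1)).findIdx? (fun x => x == (L.length : Int)) with _ | j <;> simp

theorem find_lt (L : List Int) (h : 0 < L.length) : larryFind L 0 < L.length := by
  rw [larryFind_eq]
  rcases hf : (L.take (L.length - 1)).findIdx? (fun x => x == (L.length : Int)) with _ | j
  · simp; omega
  · have := List.findIdx?_eq_some_iff_findIdx_eq.mp hf |>.1
    have hlen : (L.take (L.length - 1)).length ≤ L.length - 1 := by simp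
    simp only [Option.getD_some]
    omega

theorem rotLoop_spec (k : Nat) : ∀ (L : List Int) (cur : Nat), L.length - cur = k → cur < L.length →
    rotLoop L cur =
      if (L.length - cur) % 2 = 1 then
        (L.take cur ++ L.drop (cur + 1) ++ [L.getD cur 0], L.length - 1)
      else
        (L.take cur ++ (L.drop (cur + 1)).take (L.length - cur - 2) ++
          [L.getD cur 0, L.getD (L.length - 1) 0], L.length - 2) := by
  induction k using Nat.strong_induction_on with
  | _ k IH =>
    intro L cur hk h
    rw [rotLoop]
    by_cases hc : cur + 2 < L.length
    · simp only [if_pos hc]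
      -- name the three values
      set a := L.getD cur 0 with ha
      set b := L.getD (cur + 1) 0 with hb
      set c := L.getD (cur + 2) 0 with hcv
      have hb2 : (L.set cur b).getD (cur + 2) 0 = c := by
        rw [List.getD_eq_getElem _ 0 (by simp; omega), List.getElem_set_ne (by omega)]
        rw [hcv, List.getD_eq_getElem _ 0 (by omega)]
      have h3 : ((L.set cur b).set (cur+1) ((L.set cur b).getD (cur + 2) 0)).set (cur+2) a
          = L.take cur ++ [b, c, a] ++ L.drop (cur + 3) := by
        rw [hb2]; exact set3_window L cur hc b c a
      rw [h3]
      set L3 := L.take cur ++ [b, c, a] ++ L.drop (cur + 3) with hL3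
      have hlen3 : L3.length = L.length := by
        simp [hL3]; omega
      rw [IH (L.length - (cur + 2)) (by omega) L3 (cur + 2) (by omega) (by omega)]
      -- facts about L3 pieces
      have htake : L3.take (cur + 2) = L.take cur ++ [b, c] := by
        rw [hL3]
        rw [show L.take cur ++ [b, c, a] ++ L.drop (cur+3)
            = L.take cur ++ ([b, c] ++ ([a] ++ L.drop (cur+3))) by simp]
        rw [show cur + 2 = (L.take cur).length + ([b,c].length) by simp; omega]
        rw [List.take_append]
        simp
      have hdrop : L3.drop (cur + 3) = L.drop (cur + 3) := by
        rw [hL3]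
        rw [show L.take cur ++ [b, c, a] ++ L.drop (cur+3)
            = (L.take cur ++ [b, c, a]) ++ L.drop (cur+3) by simp]
        rw [show cur + 3 = (L.take cur ++ [b,c,a]).length by simp; omega]
        rw [List.drop_left]
      have hget3 : L3.getD (cur + 2) 0 = a := by
        have h1 : L3[cur + 2]? = some a := by
          rw [hL3, show L.take cur ++ [b, c, a] ++ L.drop (cur+3)
              = (L.take cur ++ [b, c]) ++ ([a] ++ L.drop (cur+3)) by simp]
          rw [List.getElem?_append_right
            (by simp only [List.length_append, List.length_take, List.length_cons, List.length_nil]; omega)]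
          rw [show cur + 2 - (L.take cur ++ [b, c]).length = 0
            by simp only [List.length_append, List.length_take, List.length_cons, List.length_nil]; omega]
          rfl
        rw [List.getD_eq_getElem?_getD, h1]
        rfl
      have hgetlast : L.length - 1 ≥ cur + 3 → L3.getD (L.length - 1) 0 = L.getD (L.length - 1) 0 := by
        intro hge
        have h1 : L3[L.length - 1]? = (L.drop (cur + 3))[L.length - 1 - (cur + 3)]? := by
          rw [hL3, show L.take cur ++ [b, c, a] ++ L.drop (cur+3)
              = (L.take cur ++ [b, c, a]) ++ L.drop (cur+3) by simp]
          rw [List.getElem?_append_right (by simp; omega)]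
          congr 1
          simp
          omega
        rw [List.getD_eq_getElem?_getD, List.getD_eq_getElem?_getD, h1, List.getElem?_drop]
        congr 2
        omega
      by_cases hpar : (L.length - cur) % 2 = 1
      · rw [if_pos (by omega : (L3.length - (cur+2)) % 2 = 1), if_pos hpar]
        rw [htake, hdrop, hget3, hlen3]
        rw [show L.drop (cur + 1) = b :: c :: L.drop (cur + 3) by
          rw [List.drop_eq_getElem_cons (by omega : cur + 1 < L.length)]
          rw [List.drop_eq_getElem_cons (by omega : cur + 2 < L.length)]
          congr 1
          · rw [hb, List.getD_eq_getElem _ 0 (by omega)]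
          congr 1
          · rw [hcv, List.getD_eq_getElem _ 0 (by omega)]]
        simp
      · rw [if_neg (by omega : ¬ (L3.length - (cur+2)) % 2 = 1), if_neg hpar]
        have hge : L.length - 1 ≥ cur + 3 := by omega
        rw [htake, hdrop, hget3, hlen3, hgetlast hge]
        rw [show L.drop (cur + 1) = b :: c :: L.drop (cur + 3) by
          rw [List.drop_eq_getElem_cons (by omega : cur + 1 < L.length)]
          rw [List.drop_eq_getElem_cons (by omega : cur + 2 < L.length)]
          congr 1
          · rw [hb, List.getD_eq_getElem _ 0 (by omega)]
          congr 1
          · rw [hcv, List.getD_eq_getElem _ 0 (by omega)]]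
        rw [show L.length - cur - 2 = (L.length - (cur + 2) - 2) + 2 by omega]
        simp [List.take_succ_cons]
    · simp only [if_neg hc]
      -- len - cur is 1 or 2
      by_cases hone : L.length = cur + 1
      · rw [if_pos (by omega)]
        have : L.drop (cur + 1) = [] := by apply List.drop_eq_nil_of_le; omega
        rw [this]
        have : L.take cur = L.dropLast := by rw [List.dropLast_eq_take]; congr 1; omega
        rw [this]
        have hlast : L.getD cur 0 = L.getLast (by intro h0; rw [h0] at h; simp at h) := by
          rw [List.getD_eq_getElem _ 0 (by omega), List.getLast_eq_getElem]
          congr 1; omega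
        rw [hlast]
        simp [List.dropLast_concat_getLast]
        omega
      · have htwo : L.length = cur + 2 := by omega
        rw [if_neg (by omega)]
        have hd : (L.drop (cur + 1)).take (L.length - cur - 2) = [] := by
          rw [show L.length - cur - 2 = 0 by omega]; simp
        rw [hd]
        have hg1 : L.getD cur 0 = L[cur]'(by omega) := List.getD_eq_getElem _ 0 (by omega)
        have hg2 : L.getD (L.length - 1) 0 = L[cur + 1]'(by omega) := by
          rw [List.getD_eq_getElem _ 0 (by omega)]; congr 1; omega
        rw [hg1, hg2]
        simp only [Prod.mk.injEq]
        refine ⟨?_, by omega⟩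
        simp only [List.append_nil]
        rw [show ([L[cur]'(by omega), L[cur+1]'(by omega)] : List Int)
            = [L[cur]'(by omega)] ++ [L[cur+1]'(by omega)] from rfl]
        rw [← List.append_assoc]
        rw [List.take_concat_get' L cur (by omega)]
        rw [List.take_concat_get' L (cur+1) (by omega)]
        exact (List.take_of_length_le (by omega)).symm

theorem stepA_eq (L : List Int) (h : 3 < L.length) :
    (let c := larryFind L 0
     let p := rotLoop L c
     let cur := p.2
     let L2 :=
       if cur + 1 < p.1.length then
         let t := p.1.getD (cur + 1) 0
         let La := p.1.set (cur + 1) (p.1.getD cur 0)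
         let Lb := La.set cur (La.getD (cur - 1) 0)
         Lb.set (cur - 1) t
       else p.1
     L2.take (L.length - 1)) = altStep L := by
  simp only
  set c := larryFind L 0 with hcdef
  have hclt : c < L.length := find_lt L (by omega)
  have hcle : c ≤ L.length - 1 := by
    rw [hcdef, larryFind_eq]
    rcases hf : (L.take (L.length - 1)).findIdx? (fun x => x == (L.length : Int)) with _ | j
    · simp
    · have := List.findIdx?_eq_some_iff_findIdx_eq.mp hf |>.1
      have hlen : (L.take (L.length - 1)).length ≤ L.length - 1 := by simp
      simp only [Option.getD_some]
      omega
  have hcB : ((L.take (L.length - 1)).findIdx? (fun x => x == (L.length : Int))).getD (L.length - 1) = c := by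
    rw [hcdef, larryFind_eq]
  set E := L.eraseIdx c with hE
  have hEform : E = L.take c ++ L.drop (c + 1) := List.eraseIdx_eq_take_drop_succ L c
  have hElen : E.length = L.length - 1 := by
    rw [hEform]; simp; omega
  rw [rotLoop_spec (L.length - c) L c rfl hclt]
  unfold altStep
  simp only [hcB, ← hE]
  by_cases hpar : (L.length - c) % 2 = 1
  · -- odd: no fix, result is E; altStep takes the else branch
    rw [if_pos hpar]
    simp only
    have hg : ¬ ((L.length - c) % 2 == 0) = true := by simp; omega
    rw [if_neg hg]
    have hlen1 : (L.take c ++ L.drop (c + 1) ++ [L.getD c 0]).length = L.length := by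
      simp; omega
    rw [if_neg (by omega : ¬ (L.length - 1) + 1 < (L.take c ++ L.drop (c + 1) ++ [L.getD c 0]).length)]
    rw [show L.take c ++ L.drop (c + 1) ++ [L.getD c 0] = E ++ [L.getD c 0] by rw [hEform]]
    rw [List.take_append_of_le_length (by omega)]
    rw [List.take_of_length_le (by omega)]
  · -- even: the fix block runs; altStep swaps the last two of E
    rw [if_neg hpar]
    simp only
    have hceven : (L.length - c) % 2 = 0 := by omega
    have hcle2 : c ≤ L.length - 2 := by omega
    rw [if_pos (by simp [hceven] : ((L.length - c) % 2 == 0) = true)]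
    set Q := L.take c ++ (L.drop (c + 1)).take (L.length - c - 2) with hQ
    have hQlen : Q.length = L.length - 2 := by
      rw [hQ]; simp; omega
    have hQE : Q = E.take (L.length - 2) := by
      rw [hEform, List.take_append, List.take_take, hQ]
      congr 1
      · congr 1
        rw [min_eq_right (by omega : c ≤ L.length - 2)]
      · congr 1
        simp only [List.length_take]
        omega
    set x := L.getD c 0 with hx
    set z := L.getD (L.length - 1) 0 with hz
    set L' := Q ++ [x, z] with hL'
    have hL'len : L'.length = L.length := by rw [hL']; simp; omega
    rw [if_pos (by omega : L.length - 2 + 1 < L'.length)]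
    -- the three captured values
    have hvt : L'.getD (L.length - 2 + 1) 0 = z := by
      have h1 : L'[L.length - 2 + 1]? = some z := by
        rw [hL', List.getElem?_append_right (by omega)]
        rw [show L.length - 2 + 1 - Q.length = 1 by omega]
        rfl
      rw [List.getD_eq_getElem?_getD, h1]; rfl
    have hvx : L'.getD (L.length - 2) 0 = x := by
      have h1 : L'[L.length - 2]? = some x := by
        rw [hL', List.getElem?_append_right (by omega)]
        rw [show L.length - 2 - Q.length = 0 by omega]
        rfl
      rw [List.getD_eq_getElem?_getD, h1]; rfl
    set y := E.getD (L.length - 3) 0 with hy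
    have hvy : (L'.set (L.length - 2 + 1) x).getD (L.length - 2 - 1) 0 = y := by
      have hne : L.length - 2 - 1 = L.length - 3 := by omega
      rw [hne]
      have h1 : (L'.set (L.length - 2 + 1) x)[L.length - 3]? = E[L.length - 3]? := by
        rw [List.getElem?_set_ne (by omega)]
        rw [hL', List.getElem?_append_left (by omega)]
        rw [hQE, List.getElem?_take_of_lt (by omega)]
      rw [List.getD_eq_getElem?_getD, h1, hy, List.getD_eq_getElem?_getD]
    rw [hvt, hvx, hvy]
    -- reorder the three sets into increasing positions and apply set3_window
    have hswap : ((L'.set (L.length - 2 + 1) x).set (L.length - 2) y).set (L.length - 2 - 1) z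
        = ((L'.set (L.length - 3) z).set (L.length - 2) y).set (L.length - 1) x := by
      rw [show L.length - 2 - 1 = L.length - 3 by omega,
          show L.length - 2 + 1 = L.length - 1 by omega]
      rw [List.set_comm _ _ (by omega : L.length - 1 ≠ L.length - 2),
          List.set_comm _ _ (by omega : L.length - 1 ≠ L.length - 3),
          List.set_comm _ _ (by omega : L.length - 2 ≠ L.length - 3)]
    rw [hswap]
    have h3 : ((L'.set (L.length - 3) z).set (L.length - 2) y).set (L.length - 1) x
        = L'.take (L.length - 3) ++ [z, y, x] ++ L'.drop L.length := by
      have := set3_window L' (L.length - 3) (by omega) z y x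
      rw [show L.length - 3 + 1 = L.length - 2 by omega,
          show L.length - 3 + 2 = L.length - 1 by omega,
          show L.length - 3 + 3 = L.length by omega] at this
      exact this
    rw [h3, List.drop_of_length_le (by omega), List.append_nil]
    rw [show (L'.take (L.length - 3) ++ [z, y, x]).take (L.length - 1)
        = L'.take (L.length - 3) ++ [z, y] by
      rw [List.take_append]
      congr 1
      · rw [List.take_take]
        congr 1
        omega
      · rw [show L.length - 1 - (L'.take (L.length - 3)).length = 2
            by simp only [List.length_take, hL'len]; omega]
        rfl]
    -- B side via set2_window
    have hm : E.length - 1 = L.length - 2 := by omega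
    have hm2 : E.length - 2 = L.length - 3 := by omega
    have hBz : E.getD (E.length - 1) 0 = z := by
      rw [hm, hz]
      have h1 : E[L.length - 2]? = L[L.length - 1]? := by
        rw [hEform, List.getElem?_append_right (by simp; omega), List.getElem?_drop]
        congr 1
        simp
        omega
      rw [List.getD_eq_getElem?_getD, List.getD_eq_getElem?_getD, h1]
    have hB : (E.set (E.length - 2) (E.getD (E.length - 1) 0)).set (E.length - 1) (E.getD (E.length - 2) 0)
        = E.take (L.length - 3) ++ [z, y] := by
      rw [hBz, hm, hm2, ← hy]
      have := set2_window E (L.length - 3) (by omega) z y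
      rw [show L.length - 3 + 1 = L.length - 2 by omega,
          show L.length - 3 + 2 = L.length - 1 by omega] at this
      rw [this, List.drop_of_length_le (by omega), List.append_nil]
    rw [hB]
    congr 1
    rw [hL', List.take_append_of_le_length (by omega), hQE, List.take_take]
    congr 1
    omega



theorem main_eq_aux (k : Nat) : ∀ L : List Int, L.length = k → larrysArray L = larrysArray_alt L := by
  induction k using Nat.strong_induction_on with
  | _ k IH =>
    intro L hk
    by_cases h3 : 3 < L.length
    · have hloop : altLoop L = altLoop (altStep L) := by
        rw [altLoop]; rw [if_pos h3]
      have h1 : larrysArray L = larrysArray (altStep L) := by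
        conv_lhs => rw [larrysArray]
        rw [if_neg (by omega), if_neg (by simp; omega)]
        exact congrArg larrysArray (stepA_eq L h3)
      have h2 : larrysArray_alt L = larrysArray_alt (altStep L) := by
        simp only [larrysArray_alt, hloop]
      rw [h1, h2]
      exact IH (altStep L).length (by have := altStep_length_lt L h3; omega) (altStep L) rfl
    · have hA : altLoop L = L := by rw [altLoop, if_neg h3]
      by_cases hlt : L.length < 3
      · rw [larrysArray, if_pos hlt]
        simp only [larrysArray_alt, hA]
        rw [if_pos hlt]
      · rw [larrysArray, if_neg hlt, if_pos (by simp; omega)]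
        simp only [larrysArray_alt, hA]
        rw [if_neg hlt]

-- ===== VERDICT (by name: the statement is the Claim_ definition above) =====
theorem larrysArray_spec : Claim_equal_larrysArray := by
  intro A _
  exact (main_eq_aux A.length A rfl)
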